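-- pv_equiv track=rewrite | github.com/phung1003/MM | MM-API/ECC.py | simple_hash
-- ===== SOURCE A (Python) =====
-- def simple_hash(txt):
--     txt = txt.upper()
--     ans = 0
--     for c in txt:
--         if c == ' ':
--             value = 27  # Gán dấu cách là 27
--         elif c == '.':
--             value = 28  # Gán dấu chấm là 28
--         elif c == ',':
--             value = 29  # Gán dấu phẩy là 29
--         elif '0' <= c <= '9':
--             value = ord(c) - ord('0') + 30  # Gán số 0-9 từ 30 đến 39
--         else:
--             value = ord(c) - ord('A') + 1  # Gán A-Z từ 1 đến 26
--         ans = ans * 40 + value  # Nhân 40 để có thêm không gian cho tất cả các ký tự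
--     return ans
-- ===== SOURCE B (Python) =====
-- def _char_value(c):
--     if c == ' ':
--         return 27
--     elif c == '.':
--         return 28
--     elif c == ',':
--         return 29
--     elif '0' <= c <= '9':
--         return ord(c) - ord('0') + 30
--     else:
--         return ord(c) - ord('A') + 1
--
-- def simple_hash(txt):
--     vals = [_char_value(c) for c in txt.upper()]
--     total = 0
--     weight = 1
--     for v in reversed(vals):
--         total += v * weight
--         weight *= 40
--     return total
-- ===== Notes on version B (the rewrite author's own statement) =====
-- stated objective: alternative
-- what changed: Replaces Horner's single forward accumulator fold by a two-pass decomposition: first map characters to their values, then evaluate the base-40 polynomial back-to-front with an explicit running positional weight.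
import Mathlib
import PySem

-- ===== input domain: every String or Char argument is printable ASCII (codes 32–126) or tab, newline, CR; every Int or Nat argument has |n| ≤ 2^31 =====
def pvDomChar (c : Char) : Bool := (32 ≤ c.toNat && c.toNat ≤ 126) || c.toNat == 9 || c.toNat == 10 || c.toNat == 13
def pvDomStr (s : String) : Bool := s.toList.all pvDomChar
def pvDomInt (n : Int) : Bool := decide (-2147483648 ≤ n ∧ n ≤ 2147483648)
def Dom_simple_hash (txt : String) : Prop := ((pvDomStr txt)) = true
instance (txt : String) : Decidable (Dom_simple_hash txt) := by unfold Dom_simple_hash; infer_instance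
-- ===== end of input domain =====

-- B replaces A's forward Horner accumulator by a two-pass decomposition: a character-value
-- table, then a back-to-front pass with a running positional weight; objective: alternative.

-- ===== PORT A =====
-- literal transliteration of A: Horner fold with the inline if/elif ladder
def simple_hash (txt : String) : Int :=
  (PySem.Str.upper txt).toList.foldl
    (fun ans c =>
      ans * 40 +
        (if c = ' ' then (27 : Int)
         else if c = '.' then 28
         else if c = ',' then 29
         else if '0' ≤ c ∧ c ≤ '9' then (c.toNat : Int) - ('0'.toNat : Int) + 30
         else (c.toNat : Int) - ('A'.toNat : Int) + 1))
    0

-- ===== PORT B =====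
-- the same if/elif ladder as a helper (Source B's _char_value)
def pvCharValue (c : Char) : Int :=
  if c = ' ' then (27 : Int)
  else if c = '.' then 28
  else if c = ',' then 29
  else if '0' ≤ c ∧ c ≤ '9' then (c.toNat : Int) - ('0'.toNat : Int) + 30
  else (c.toNat : Int) - ('A'.toNat : Int) + 1

-- Source B: vals = map of values; then back-to-front pass with running weight
def simple_hash_alt (txt : String) : Int :=
  let vals := (PySem.Str.upper txt).toList.map pvCharValue
  (vals.reverse.foldl (fun (st : Int × Int) v => (st.1 + v * st.2, st.2 * 40)) (0, 1)).1

-- ===== PRECONDITION & SPEC =====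
def Spec_simple_hash (txt : String) (out : Int) : Prop := out = simple_hash_alt txt
instance (txt : String) (out : Int) : Decidable (Spec_simple_hash txt out) := by unfold Spec_simple_hash; infer_instance

-- ===== CLAIM (what is proved, stated in full; the proofs are below) =====
def Claim_equal_simple_hash : Prop := ∀ (txt : String), Dom_simple_hash txt → Spec_simple_hash txt (simple_hash txt)

-- ===== LEMMAS AND PROOFS =====

-- polynomial value of a value list, most significant first
def pvPoly : List Int → Int
  | [] => 0
  | x :: l => x * (40 : Int) ^ l.length + pvPoly l

-- B's reversed running-weight fold, from any state
theorem pvRevFold (l : List Int) : ∀ (t w : Int),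
    l.reverse.foldl (fun (st : Int × Int) v => (st.1 + v * st.2, st.2 * 40)) (t, w)
      = (t + pvPoly l * w, w * (40 : Int) ^ l.length) := by
  induction l with
  | nil => intro t w; simp [pvPoly]
  | cons x l ih =>
    intro t w
    simp only [List.reverse_cons, List.foldl_append, List.foldl_cons, List.foldl_nil,
      pvPoly, List.length_cons, ih]
    refine Prod.ext ?_ ?_ <;> simp <;> ring

-- Horner fold from any accumulator
theorem pvHorner (l : List Int) : ∀ (a : Int),
    l.foldl (fun ans x => ans * 40 + x) a = a * (40 : Int) ^ l.length + pvPoly l := by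
  induction l with
  | nil => intro a; simp [pvPoly]
  | cons x l ih =>
    intro a
    simp only [List.foldl_cons, pvPoly, List.length_cons]
    rw [ih (a * 40 + x)]
    ring

-- ===== VERDICT (by name: the statement is the Claim_ definition above) =====
theorem simple_hash_spec : Claim_equal_simple_hash := by
  intro txt _
  unfold Spec_simple_hash simple_hash simple_hash_alt
  have hA : (PySem.Str.upper txt).toList.foldl
      (fun ans c =>
        ans * 40 +
          (if c = ' ' then (27 : Int)
           else if c = '.' then 28
           else if c = ',' then 29
           else if '0' ≤ c ∧ c ≤ '9' then (c.toNat : Int) - ('0'.toNat : Int) + 30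
           else (c.toNat : Int) - ('A'.toNat : Int) + 1))
      0
      = (PySem.Str.upper txt).toList.foldl (fun ans c => ans * 40 + pvCharValue c) 0 := rfl
  rw [hA]
  set l := (PySem.Str.upper txt).toList with hl
  show _ = (((l.map pvCharValue).reverse.foldl
      (fun (st : Int × Int) v => (st.1 + v * st.2, st.2 * 40)) (0, 1)).1 : Int)
  rw [pvRevFold (l.map pvCharValue) 0 1]
  have : l.foldl (fun ans c => ans * 40 + pvCharValue c) 0
      = (l.map pvCharValue).foldl (fun ans x => ans * 40 + x) 0 := by
    rw [List.foldl_map]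
  rw [this, pvHorner (l.map pvCharValue) 0]
  simp
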